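-- pv_equiv track=rewrite | github.com/Cosiek/KombiVojager | solvers/Little.py | reduce_columns
-- ===== SOURCE A (Python) =====
-- def reduce_columns(array):
--     lb = 0
--     for i in range(len(array)):
--         m = min([row[i] for row in array])
--         lb += m
--         for row in array:
--             row[i] -= m
--     return lb
-- ===== SOURCE B (Python) =====
-- def reduce_columns(array):
--     n = len(array)
--     mins = None
--     for row in array:
--         if mins is None:
--             mins = row[:n]
--         else:
--             mins = [min(a, b) for a, b in zip(mins, row)]
--     if mins is None:
--         return 0
--     for row in array:
--         for i in range(n):
--             row[i] -= mins[i]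
--     return sum(mins)
-- ===== Notes on version B (the rewrite author's own statement) =====
-- stated objective: alternative
-- what changed: Replaces A's interleaved per-column min-then-subtract (column-outer loop recomputing a min over all rows for each column) by a two-phase row-wise scheme: one row-major pass folds a running-minima table with zip, then the bound is the sum of that table and the subtraction is a separate pass.
import Mathlib
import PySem

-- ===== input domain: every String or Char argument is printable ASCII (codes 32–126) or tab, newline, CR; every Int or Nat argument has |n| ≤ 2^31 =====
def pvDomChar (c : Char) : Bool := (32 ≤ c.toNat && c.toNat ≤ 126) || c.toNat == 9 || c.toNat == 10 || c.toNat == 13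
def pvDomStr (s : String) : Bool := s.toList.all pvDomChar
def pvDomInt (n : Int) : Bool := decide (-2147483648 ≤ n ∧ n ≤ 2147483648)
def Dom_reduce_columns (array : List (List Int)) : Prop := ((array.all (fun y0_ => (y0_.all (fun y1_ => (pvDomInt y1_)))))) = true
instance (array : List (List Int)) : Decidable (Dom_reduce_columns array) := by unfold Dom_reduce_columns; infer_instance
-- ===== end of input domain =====

-- B reorganizes A's column-outer interleaved min-then-subtract loop into a two-phase row-wise
-- scheme (fold a running-minima table over the rows with zip, sum it, subtract in a later pass);
-- both Pythons mutate the argument identically, the equivalence proved is about the return value.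

-- ===== PORT A =====
-- loop body of A's outer 'for i in range(len(array))' loop (state: lb, the mutated matrix)
def pvStepA (st : Int × List (List Int)) (i : Int) : Int × List (List Int) :=
  let m := (PySem.List.min? (st.2.map (fun row => PySem.List.pyGetD row i 0)) (fun x => x)).getD 0
  (st.1 + m, st.2.map (fun row => PySem.List.pySetD row i (PySem.List.pyGetD row i 0 - m)))

def reduce_columns (array : List (List Int)) : Int :=
  ((PySem.List.pyRange 0 (array.length : Int) 1).foldl pvStepA (0, array)).1

-- ===== PORT B =====
def reduce_columns_alt (array : List (List Int)) : Int :=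
  let n : Int := (array.length : Int)
  let mins : Option (List Int) := array.foldl
    (fun acc row =>
      match acc with
      | none => some (PySem.List.slice row (some 0) (some n))
      | some m => some (List.zipWith min m row)) none
  match mins with
  | none => 0
  | some m => m.sum

-- ===== PRECONDITION & SPEC =====
-- Pre_ excludes exactly the inputs where A raises IndexError: A indexes every row at every
-- column index below len(array), so every row needs at least len(array) entries.
def Pre_reduce_columns (array : List (List Int)) : Prop :=
  ∀ row ∈ array, array.length ≤ row.length
instance (array : List (List Int)) : Decidable (Pre_reduce_columns array) := by
  unfold Pre_reduce_columns; infer_instance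
def pvWitness_reduce_columns : List (List Int) := [[1, 2], [3, 4]]

def Spec_reduce_columns (array : List (List Int)) (out : Int) : Prop := out = reduce_columns_alt array
instance (array : List (List Int)) (out : Int) : Decidable (Spec_reduce_columns array out) := by unfold Spec_reduce_columns; infer_instance

-- ===== CLAIM (what is proved, stated in full; the proofs are below) =====
def Claim_equal_reduce_columns : Prop := ∀ (array : List (List Int)), Dom_reduce_columns array → Pre_reduce_columns array → Spec_reduce_columns array (reduce_columns array)

-- ===== LEMMAS AND PROOFS =====

-- min of column i of the original matrix (0 only in the vacuous empty case)
def colMin (array : List (List Int)) (i : Int) : Int :=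
  (PySem.List.min? (array.map (fun row => PySem.List.pyGetD row i 0)) (fun x => x)).getD 0

-- in-place update of one cell leaves every other nonnegative index unchanged
theorem pvGetD_setD_ne {row : List Int} {i j : Int} {v : Int}
    (hi : 0 ≤ i) (hj : 0 ≤ j) (hne : i ≠ j) :
    PySem.List.pyGetD (PySem.List.pySetD row i v) j 0 = PySem.List.pyGetD row j 0 := by
  rw [PySem.List.pySetD_of_nonneg row v hi]
  simp only [PySem.List.pyGetD, PySem.List.pyGet?, PySem.List.pyIdx?, List.length_set]
  split_ifs with h1
  · simp only [Option.bind_some]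
    rw [List.getElem?_set_ne]
    omega
  · rfl

-- A's loop invariant: lb is the sum of the first n column minima of the ORIGINAL matrix,
-- and the mutated matrix still agrees with the original on every column index ≥ n.
theorem pvFoldA (array : List (List Int)) (n : Nat) :
    ((PySem.List.pyRange 0 (n : Int) 1).foldl pvStepA (0, array)).1
      = ((List.range n).map (fun k => colMin array (Int.ofNat k))).sum
    ∧ ∀ j : Int, (n : Int) ≤ j →
      ((PySem.List.pyRange 0 (n : Int) 1).foldl pvStepA (0, array)).2.map
          (fun row => PySem.List.pyGetD row j 0)
        = array.map (fun row => PySem.List.pyGetD row j 0) := by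
  induction n with
  | zero => simp
  | succ n ih =>
    have hsplit : PySem.List.pyRange 0 ((n + 1 : Nat) : Int) 1
        = PySem.List.pyRange 0 (n : Int) 1 ++ [(n : Int)] := by
      push_cast
      exact PySem.List.pyRange_one_succ_right (by positivity)
    rw [hsplit, List.foldl_append]
    set st := (PySem.List.pyRange 0 (n : Int) 1).foldl pvStepA (0, array) with hst
    have hm : (PySem.List.min? (st.2.map (fun row => PySem.List.pyGetD row (n : Int) 0))
        (fun x => x)).getD 0 = colMin array (n : Int) := by
      rw [ih.2 (n : Int) le_rfl]; rfl
    constructor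
    · show (pvStepA st (n : Int)).1 = _
      simp only [pvStepA, hm]
      rw [ih.1, List.range_succ]
      simp
    · intro j hj
      show (pvStepA st (n : Int)).2.map _ = _
      simp only [pvStepA, List.map_map, Function.comp_def]
      have : ∀ row ∈ st.2, (PySem.List.pyGetD (PySem.List.pySetD row (n : Int)
          (PySem.List.pyGetD row (n : Int) 0 -
            (PySem.List.min? (st.2.map (fun r => PySem.List.pyGetD r (n : Int) 0)) (fun x => x)).getD 0)) j 0)
          = PySem.List.pyGetD row j 0 := by
        intro row _
        exact pvGetD_setD_ne (by positivity) (by omega) (by omega)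
      rw [List.map_congr_left fun row h => this row h]
      exact ih.2 j (by omega)

-- B's fold with the Option layer stripped after the first row seeds the table
theorem pvFoldB_some (rs : List (List Int)) (n : Int) (m0 : List Int) :
    rs.foldl (fun (acc : Option (List Int)) row =>
      match acc with
      | none => some (PySem.List.slice row (some 0) (some n))
      | some m => some (List.zipWith min m row)) (some m0)
    = some (rs.foldl (fun m row => List.zipWith min m row) m0) := by
  induction rs generalizing m0 with
  | nil => rfl
  | cons r rs ih =>
    rw [List.foldl_cons, List.foldl_cons]
    exact ih (List.zipWith min m0 r)

-- pointwise description of the running-minima table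
theorem pvFoldB_getD (rs : List (List Int)) (m0 : List Int)
    (h : ∀ row ∈ rs, m0.length ≤ row.length) :
    (rs.foldl (fun m row => List.zipWith min m row) m0).length = m0.length
    ∧ ∀ k : Nat, k < m0.length →
      (rs.foldl (fun m row => List.zipWith min m row) m0).getD k 0
      = rs.foldl (fun acc row => min acc (row.getD k 0)) (m0.getD k 0) := by
  induction rs generalizing m0 with
  | nil => simp
  | cons r rs ih =>
    have hr : m0.length ≤ r.length := h r List.mem_cons_self
    have hlen : (List.zipWith min m0 r).length = m0.length := by
      simp [List.length_zipWith]
      exact hr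
    have ih' := ih (List.zipWith min m0 r) (by
      intro row hrow
      rw [hlen]
      exact h row (List.mem_cons_of_mem r hrow))
    simp only [List.foldl_cons]
    refine ⟨ih'.1.trans hlen, fun k hk => ?_⟩
    rw [ih'.2 k (by omega)]
    congr 1
    rw [List.getD_eq_getElem _ _ (by omega), List.getD_eq_getElem _ _ (by omega),
        List.getD_eq_getElem _ _ (by omega), List.getElem_zipWith]

theorem pvFinal (array : List (List Int)) (hpre : ∀ row ∈ array, array.length ≤ row.length) :
    reduce_columns array = reduce_columns_alt array := by
  rw [reduce_columns, (pvFoldA array array.length).1]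
  cases array with
  | nil => rfl
  | cons r rs =>
    set N : Nat := (r :: rs).length with hN
    have hr : N ≤ r.length := hpre r List.mem_cons_self
    have hm0 : (r.take N).length = N := by simp; omega
    have hrows : ∀ row ∈ rs, (r.take N).length ≤ row.length := by
      intro row hrow; rw [hm0]; exact hpre row (List.mem_cons_of_mem r hrow)
    have hB := pvFoldB_getD rs (r.take N) hrows
    have hslice : PySem.List.slice r (some 0) (some (((r :: rs).length : Nat) : Int))
        = r.take N := by
      rw [PySem.List.slice_zero_start, PySem.List.slice_to _ (by positivity)]
      simp [hN]
    have halt : reduce_columns_alt (r :: rs)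
        = (rs.foldl (fun m row => List.zipWith min m row) (r.take N)).sum := by
      simp only [reduce_columns_alt, List.foldl_cons, pvFoldB_some, hslice]
    rw [halt]
    congr 1
    apply List.ext_getElem
    · simp [hB.1, hm0]
    · intro k hk1 hk2
      have hkN : k < N := by simpa using hk1
      rw [← List.getD_eq_getElem (rs.foldl (fun m row => List.zipWith min m row) (r.take N)) 0 hk2,
          hB.2 k (by omega)]
      have hgetm0 : (r.take N).getD k 0 = r.getD k 0 := by
        rw [List.getD_eq_getElem _ _ (by omega), List.getD_eq_getElem _ _ (by omega),
            List.getElem_take]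
      rw [hgetm0]
      simp only [List.getElem_map, List.getElem_range]
      rw [colMin]
      rw [List.map_cons, PySem.List.min?_id_cons]
      simp only [Option.getD_some, List.foldl_map, PySem.List.pyGetD_natCast, Int.ofNat_eq_natCast]

-- ===== VERDICT (by name: the statement is the Claim_ definition above) =====
theorem reduce_columns_spec : Claim_equal_reduce_columns := by
  intro array _ hpre
  unfold Spec_reduce_columns
  exact pvFinal array hpre
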